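/- GENERATED by tools/from_farm_form.py from prooffarm-gif/accepted/DGifDecompressInput.P/Proof.lean (a worked proof of the farm's unit `DGifDecompressInput.P`,
   accepted by the verdict) — do not edit. -/
import Gif.Spec.Units.DGifDecompressInput_P
import Gif.Spec.AllSegs

open X86 X86.User Asan ProgX.Base ProgX.Base.Spec Gif.Spec

set_option maxRecDepth 4000
set_option maxHeartbeats 4000000

/-!
  `DGifDecompressInput.P` (0x1067a0 … 0x1067eb, 16 instructions; dgif_lib.c:1068): THE PROLOGUE of the protected function
  `DGifDecompressInput`. The recipe is that of Gif/Spec/FrameCarry.lean (worked: farm.gif/worked/DGifGetWord.P):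
    1. the prelude and the walk to the cut behind the last inline shadow store;
    2. `name_stores2`: the memory before the shadow stores gets the name `M0`;
    3. about `M0` (a nest of STACK stores over `e.mem`): the footprint `hsame0`, the six saved registers' slots;
    4. `after_prologue` (`HeapInv` with the own frame pushed, `GifOK`, `rem`), `prologue_same` (the two footprints);
    5. the exit assertion `AfterP`: `Body`, `rdi`, and `LZOK` / `mu` through the prologue's own footprint (stack and shadow only).
-/

/-- The prologue of `DGifDecompressInput` establishes `AfterP` at 0x1067eb. -/
theorem Gif.Spec.Proved.DGifDecompressInput_P_ok : Gif.Spec.DGifDecompressInput_P.Statement := by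
  intro Lay hLay μ hμ u₀ hcode H rest frames F R e ret he hpre
  -- 1. THE PRELUDE: the entry's facts, the precondition
  have he0 := he
  v_entry he
  obtain ⟨henv, hlz, hrdi, hout⟩ := hpre
  -- THE WALK (0x1067a0 … 0x1067eb, dgif_lib.c:1068), to the cut behind the last inline shadow store
  u_walk hcode [hμ.vendor] until [Gif.L.DGifDecompressInput.at_1067eb] span [ProgX.Base.L.textLo, ProgX.Base.L.textHi] side (v_side)
  -- 2. NAMING THE MEMORY before the two shadow stores (0x1067d5, 0x1067e0)
  have e120 : (e.reg .rsp - 120).toNat = (e.reg .rsp).toNat - 120 := by u_omega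
  obtain ⟨M0, hM0, hmem⟩ := name_stores2 (e.reg .rsp - 120) 12582912 12582916 0 4 4059165169 4 4 4092850945
    w_mem (by omega) (by decide) (by decide) (by decide) (by decide)
  have hpro : Gif.Frames.DGifDecompressInput.prologue = [⟨0, 4, 4059165169⟩, ⟨4, 4, 4092850945⟩] := rfl
  rw [← hpro, e120] at hmem
  -- 3. ABOUT `M0`: only stack stores over `e.mem` (six pushes, the frame's three header words)
  have hsame0 : Mem.SameExcept [⟨(e.reg .rsp).toNat - 352, (e.reg .rsp).toNat⟩] e.mem M0 := by
    rw [hM0]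
    u_same
  have k_r15 : M0.readLE (e.reg .rsp - 8) 8 = (e.reg .r15).toNat := by
    rw [hM0]
    u_read
  have k_r14 : M0.readLE (e.reg .rsp - 16) 8 = (e.reg .r14).toNat := by
    rw [hM0]
    u_read
  have k_r13 : M0.readLE (e.reg .rsp - 24) 8 = (e.reg .r13).toNat := by
    rw [hM0]
    u_read
  have k_r12 : M0.readLE (e.reg .rsp - 32) 8 = (e.reg .r12).toNat := by
    rw [hM0]
    u_read
  have k_rbp : M0.readLE (e.reg .rsp - 40) 8 = (e.reg .rbp).toNat := by
    rw [hM0]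
    u_read
  have k_rbx : M0.readLE (e.reg .rsp - 48) 8 = (e.reg .rbx).toNat := by
    rw [hM0]
    u_read
  clear hM0 w_mem
  -- 4. THE ENVIRONMENT behind the prologue: the heap's invariant with the own frame pushed, the state invariant, the reader
  obtain ⟨hinv1, hok1, hrem1⟩ := after_prologue (top := (e.reg .rsp).toNat) (top' := (e.reg .rsp).toNat - 120) (ro := 120)
    (Fl := Gif.Frames.DGifDecompressInput) henv.heap.inv henv.ctx henv.ok Gif.Frames.DGifDecompressInput_ok rfl he_align hsame0
    (by omega) (Nat.le_refl _) (by omega) (by omega)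
  -- the prologue's own footprint, and the same in front of the contract's windows (`Body.same`)
  have hsame1 := prologue_same (top := (e.reg .rsp).toNat) (Fl := Gif.Frames.DGifDecompressInput)
    Gif.Frames.DGifDecompressInput_ok (ro := 120) (ro' := 56) rfl rfl he_align (by omega) (by omega) hsame0 []
  have hsame2 := prologue_same (top := (e.reg .rsp).toNat) (Fl := Gif.Frames.DGifDecompressInput)
    Gif.Frames.DGifDecompressInput_ok (ro := 120) (ro' := 56) rfl rfl he_align (by omega) (by omega) hsame0
    [⟨F.pv + 20, F.pv + 32⟩, ⟨F.pv + 44, F.pv + 56⟩, ⟨F.pv + 88, F.pv + 344⟩,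
     ⟨(e.reg .rsi).toNat, (e.reg .rsi).toNat + 4⟩, ⟨F.gif + 96, F.gif + 100⟩, ⟨R.cur, R.cur + 8⟩]
  have hin : ∀ s, s ∈ Gif.Frames.DGifDecompressInput.prologue → s.idx + s.width ≤ 8 := by decide
  rw [← hmem] at hinv1 hok1 hrem1 hsame1 hsame2
  -- WHERE pv AND THE CURSOR ARE: the private object is in the heap's region, the cursor at or above the return-address slot
  have hcur := henv.ctx.cursor_range henv.heap.inv.shadow
  have hbase := henv.heap.base
  have hpin := henv.ok.owns.inside henv.heap.inv.heap (o := (F.pv, 24936)) (List.mem_cons_of_mem _ List.mem_cons_self)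
  simp only at hpin
  have hp1 : 0x800040 ≤ F.pv := by omega
  have hp2 : F.pv + 24968 ≤ 0xC00000 := by omega
  clear hpin
  -- every window of the prologue's own footprint is below pv (the stack) or above it (the shadow)
  have hmiss : ∀ w, w ∈ [(⟨(e.reg .rsp).toNat - 352, (e.reg .rsp).toNat⟩ : Span),
      shadowSpan ((e.reg .rsp).toNat - 120) ((e.reg .rsp).toNat - 56)] →
      (w.hi ≤ (e.reg .rsp).toNat ∨ 0xC00000 ≤ w.lo) := by
    intro w hw
    simp only [List.mem_cons, List.mem_nil_iff, or_false] at hw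
    rcases hw with hw1 | hw2
    · rw [hw1]
      left
      exact Nat.le_refl _
    · rw [hw2]
      right
      unfold shadowSpan
      simp only
      omega
  -- 5. THE EXIT ASSERTION: `Body` at 0x1067eb …
  have hbody : DGifDecompressInput.Body Gif.L.DGifDecompressInput.at_1067eb H rest frames F R u₀ e ret s_1067e0 := {
    entry := he0
    pre := ⟨henv, hlz, hrdi, hout⟩
    rip := w_rip
    rsp := w_rsp
    r13 := w_r13
    r15 := w_r15
    r14 := w_r14
    -- a slot is read THROUGH the shadow stores (`readLE_storesMem`), then in `M0`
    slot_r15 := by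
      rw [hmem, readLE_storesMem M0 _ 8 _ hin (by omega) _ _ (by u_omega)]
      exact k_r15
    slot_r14 := by
      rw [hmem, readLE_storesMem M0 _ 8 _ hin (by omega) _ _ (by u_omega)]
      exact k_r14
    slot_r13 := by
      rw [hmem, readLE_storesMem M0 _ 8 _ hin (by omega) _ _ (by u_omega)]
      exact k_r13
    slot_r12 := by
      rw [hmem, readLE_storesMem M0 _ 8 _ hin (by omega) _ _ (by u_omega)]
      exact k_r12
    slot_rbp := by
      rw [hmem, readLE_storesMem M0 _ 8 _ hin (by omega) _ _ (by u_omega)]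
      exact k_rbp
    slot_rbx := by
      rw [hmem, readLE_storesMem M0 _ 8 _ hin (by omega) _ _ (by u_omega)]
      exact k_rbx
    -- the return address: the prologue's footprint ends below its slot
    slot_ra := by
      rw [prologue_same_readLE hsame1 (e.reg .rsp) 8 (Nat.le_refl _) (by omega)]
      exact he_retAddr
    inv := hinv1
    ok := hok1
    rem := Nat.le_of_eq hrem1
    same := hsame2
    code := ProgX.Base.conv_code_in w_eq
    -- DF and MXCSR by hand (`v_inv` is slow behind a walk with shadow stores)
    abi := by
      refine ProgX.Base.abiInv_of ?_ ?_
      · rw [w_flags]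
        simp only [X86.User.df_setStatus]
        exact he_df
      · rw [w_mxcsr]
        exact he_mx
  }
  -- … `rdi`, and the LZW fields, `Buf[0]`, the cursor as at the entry
  refine ReachVia.done ?_
  exact {
    body := hbody
    rdi := w_kept.get .rdi rfl
    -- `LZOK` reads `[pv + 8, pv + 48)`: between the stack and the shadow
    lz := by
      apply hlz.sameExcept hsame1 (by omega)
      intro w hw
      have hm := hmiss w hw
      omega
    -- `mu` reads the cursor, `Buf[0]` and `CrntShiftState`
    mu_le := by
      apply Nat.le_of_eq
      apply mu_sameExcept hsame1 (by omega) (by omega)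
      · intro w hw
        have hm := hmiss w hw
        omega
      · intro w hw
        have hm := hmiss w hw
        omega
      · intro w hw
        have hm := hmiss w hw
        omega
  }
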